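-- pv_equiv track=rewrite | github.com/TreeMage/pbim-preprocessing | pbim_preprocessor/post_processor/pbim.py | _compute_start_and_end_indices
-- ===== SOURCE A (Python) =====
-- from typing import List, BinaryIO, Optional, Tuple, Callable
--
-- def _compute_start_and_end_indices(indices: List[int]) -> List[Tuple[int, int]]:
--     computed_indices = []
--     start = 0
--     for i in range(1, len(indices)):
--         if indices[i] != indices[i - 1] + 1:
--             if start < i - 1:
--                 computed_indices.append((indices[start], indices[i - 1] + 1))
--             start = i
--     if start < len(indices) - 1:
--         computed_indices.append((indices[start], indices[-1] + 1))
--     return computed_indices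
-- ===== SOURCE B (Python) =====
-- from typing import List, Tuple
--
-- def _chunk_consecutive(indices: List[int]) -> List[List[int]]:
--     groups: List[List[int]] = []
--     for x in indices:
--         if groups and groups[-1][-1] + 1 == x:
--             groups[-1].append(x)
--         else:
--             groups.append([x])
--     return groups
--
-- def _compute_start_and_end_indices(indices: List[int]) -> List[Tuple[int, int]]:
--     return [(g[0], g[-1] + 1) for g in _chunk_consecutive(indices) if len(g) >= 2]
-- ===== Notes on version B (the rewrite author's own statement) =====
-- stated objective: alternative
-- what changed: Replaces the index loop with a start pointer by a two-phase decomposition: first chunk the list into maximal consecutive runs, then emit (first, last+1) for each run of length >= 2 via a comprehension.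
import Mathlib
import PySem

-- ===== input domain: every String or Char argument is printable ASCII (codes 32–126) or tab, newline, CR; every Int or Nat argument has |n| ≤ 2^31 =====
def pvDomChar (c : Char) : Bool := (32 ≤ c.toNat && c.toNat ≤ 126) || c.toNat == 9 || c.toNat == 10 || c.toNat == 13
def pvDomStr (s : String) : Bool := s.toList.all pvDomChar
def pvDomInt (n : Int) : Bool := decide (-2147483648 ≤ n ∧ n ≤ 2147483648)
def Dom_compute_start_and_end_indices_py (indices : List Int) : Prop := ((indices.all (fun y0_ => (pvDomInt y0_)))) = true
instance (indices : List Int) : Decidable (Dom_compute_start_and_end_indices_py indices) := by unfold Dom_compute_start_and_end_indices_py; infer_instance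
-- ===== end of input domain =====

-- B replaces A's index loop with a two-phase decomposition (chunk into maximal consecutive
-- runs, then emit (first, last+1) for runs of length ≥ 2); same cost, alternative structure.

-- ===== PORT A =====
-- literal transliteration of A's single loop over range(1, len(indices)) with state
-- (computed_indices, start), followed by the trailing-run check.
def compute_start_and_end_indices_py (indices : List Int) : List (Int × Int) :=
  let n : Int := (indices.length : Int)
  let res :=
    (PySem.List.pyRange 1 n 1).foldl
      (fun (st : List (Int × Int) × Int) i =>
        if PySem.List.pyGetD indices i 0 ≠ PySem.List.pyGetD indices (i - 1) 0 + 1 then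
          if st.2 < i - 1 then
            (st.1 ++ [(PySem.List.pyGetD indices st.2 0, PySem.List.pyGetD indices (i - 1) 0 + 1)], i)
          else (st.1, i)
        else st)
      ([], 0)
  if res.2 < n - 1 then
    res.1 ++ [(PySem.List.pyGetD indices res.2 0, PySem.List.pyGetD indices (-1) 0 + 1)]
  else res.1

-- ===== PORT B =====
-- Source B's loop body: extend the last group if adjacent, else open a new one.
def pvChunkStep (groups : List (List Int)) (x : Int) : List (List Int) :=
  match groups.getLast? with
  | some g =>
      if PySem.List.pyGetD g (-1) 0 + 1 = x then groups.dropLast ++ [g ++ [x]]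
      else groups ++ [[x]]
  | none => [[x]]

def pvChunkConsecutive (indices : List Int) : List (List Int) :=
  indices.foldl pvChunkStep []

def compute_start_and_end_indices_py_alt (indices : List Int) : List (Int × Int) :=
  ((pvChunkConsecutive indices).filter (fun g => 2 ≤ g.length)).map
    (fun g => (PySem.List.pyGetD g 0 0, PySem.List.pyGetD g (-1) 0 + 1))

-- ===== PRECONDITION & SPEC =====
def Spec_compute_start_and_end_indices_py (indices : List Int) (out : List (Int × Int)) : Prop := out = compute_start_and_end_indices_py_alt indices
instance (indices : List Int) (out : List (Int × Int)) : Decidable (Spec_compute_start_and_end_indices_py indices out) := by unfold Spec_compute_start_and_end_indices_py; infer_instance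

-- ===== CLAIM (what is proved, stated in full; the proofs are below) =====
def Claim_equal_compute_start_and_end_indices_py : Prop := ∀ (indices : List Int), Dom_compute_start_and_end_indices_py indices → Spec_compute_start_and_end_indices_py indices (compute_start_and_end_indices_py indices)

-- ===== LEMMAS AND PROOFS =====

-- common reference function: result of scanning a suffix, the current run having
-- first value s and last value l
def pvRunAux (s l : Int) : List Int → List (Int × Int)
  | [] => if s < l then [(s, l + 1)] else []
  | x :: xs =>
      if x = l + 1 then pvRunAux s x xs
      else (if s < l then [(s, l + 1)] else []) ++ pvRunAux x x xs

def pvSpecTop : List Int → List (Int × Int)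
  | [] => []
  | x :: xs => pvRunAux x x xs

def pvPost (gs : List (List Int)) : List (Int × Int) :=
  (gs.filter (fun g => 2 ≤ g.length)).map
    (fun g => (PySem.List.pyGetD g 0 0, PySem.List.pyGetD g (-1) 0 + 1))

theorem pvPost_append (gs hs : List (List Int)) : pvPost (gs ++ hs) = pvPost gs ++ pvPost hs := by
  simp [pvPost]

-- B-side loop lemma
theorem pvB_loop (ys : List Int) : ∀ (gs : List (List Int)) (g : List Int) (s l : Int),
    g ≠ [] → PySem.List.pyGetD g 0 0 = s → PySem.List.pyGetD g (-1) 0 = l →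
    ((g.length : Int) - 1 = l - s) →
    pvPost (List.foldl pvChunkStep (gs ++ [g]) ys) = pvPost gs ++ pvRunAux s l ys := by
  induction ys with
  | nil =>
      intro gs g s l hne hh hl hlen
      simp only [List.foldl_nil, pvRunAux, pvPost_append]
      congr 1
      by_cases h2 : 2 ≤ g.length
      · have : s < l := by
          have := hlen; omega
        simp [pvPost, h2, this, hh, hl]
      · have hlen1 : g.length = 1 := by
          cases g with
          | nil => exact absurd rfl hne
          | cons a t => simp at h2 ⊢; omega
        have : ¬ s < l := by omega
        simp [pvPost, h2, this]
  | cons y ys ih =>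
      intro gs g s l hne hh hl hlen
      simp only [List.foldl_cons]
      have hstep : pvChunkStep (gs ++ [g]) y =
          if l + 1 = y then gs ++ [g ++ [y]] else (gs ++ [g]) ++ [[y]] := by
        simp [pvChunkStep, hl]
      by_cases hadj : l + 1 = y
      · rw [hstep, if_pos hadj]
        have hh' : PySem.List.pyGetD (g ++ [y]) 0 0 = s := by
          cases g with
          | nil => exact absurd rfl hne
          | cons a t => simpa [PySem.List.pyGetD_zero_cons] using hh
        have hl' : PySem.List.pyGetD (g ++ [y]) (-1) 0 = y :=
          PySem.List.pyGetD_neg_one_append_singleton g y 0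
        have := ih gs (g ++ [y]) s y (by simp) hh' hl' (by simp; omega)
        rw [this]
        simp [pvRunAux, hadj.symm]
      · rw [hstep, if_neg hadj]
        have hh' : PySem.List.pyGetD ([y] : List Int) 0 0 = y := by
          simp [PySem.List.pyGetD_zero_cons]
        have hl' : PySem.List.pyGetD ([y] : List Int) (-1) 0 = y := by
          simpa using PySem.List.pyGetD_neg_one_append_singleton ([] : List Int) y 0
        have := ih (gs ++ [g]) [y] y y (by simp) hh' hl' (by simp)
        rw [this, pvPost_append]
        have hne' : ¬ y = l + 1 := fun h => hadj h.symm
        simp only [pvRunAux, if_neg hne', List.append_assoc]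
        congr 1
        congr 1
        by_cases h2 : 2 ≤ g.length
        · have : s < l := by omega
          simp [pvPost, h2, this, hh, hl]
        · have hlen1 : g.length = 1 := by
            cases g with
            | nil => exact absurd rfl hne
            | cons a t => simp at h2 ⊢; omega
          have : ¬ s < l := by omega
          simp [pvPost, h2, this]

theorem pvB_eq_spec (xs : List Int) : compute_start_and_end_indices_py_alt xs = pvSpecTop xs := by
  cases xs with
  | nil => simp [compute_start_and_end_indices_py_alt, pvChunkConsecutive, pvSpecTop]
  | cons x t =>
      have h0 : List.foldl pvChunkStep [] (x :: t) = List.foldl pvChunkStep ([] ++ [[x]]) t := by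
        simp [pvChunkStep]
      have hh : PySem.List.pyGetD ([x] : List Int) 0 0 = x := by
        simp [PySem.List.pyGetD_zero_cons]
      have hl : PySem.List.pyGetD ([x] : List Int) (-1) 0 = x := by
        simpa using PySem.List.pyGetD_neg_one_append_singleton ([] : List Int) x 0
      have := pvB_loop t [] [x] x x (by simp) hh hl (by simp)
      calc compute_start_and_end_indices_py_alt (x :: t)
          = pvPost (List.foldl pvChunkStep ([] ++ [[x]]) t) := by
            simp [compute_start_and_end_indices_py_alt, pvChunkConsecutive, pvPost, h0]
        _ = pvPost [] ++ pvRunAux x x t := this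
        _ = pvSpecTop (x :: t) := by simp [pvPost, pvSpecTop]

-- A-side loop lemma: running the loop body from position m to the end, with current-run
-- start position `st`, equals acc ++ pvRunAux s l (suffix), after the trailing check.
def pvAStep (indices : List Int) (st : List (Int × Int) × Int) (i : Int) : List (Int × Int) × Int :=
  if PySem.List.pyGetD indices i 0 ≠ PySem.List.pyGetD indices (i - 1) 0 + 1 then
    if st.2 < i - 1 then
      (st.1 ++ [(PySem.List.pyGetD indices st.2 0, PySem.List.pyGetD indices (i - 1) 0 + 1)], i)
    else (st.1, i)
  else st

def pvAFinish (indices : List Int) (st : List (Int × Int) × Int) : List (Int × Int) :=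
  if st.2 < (indices.length : Int) - 1 then
    st.1 ++ [(PySem.List.pyGetD indices st.2 0, PySem.List.pyGetD indices (-1) 0 + 1)]
  else st.1

theorem pvA_loop (ys : List Int) : ∀ (xs : List Int) (m : Nat) (acc : List (Int × Int))
    (start s l : Int),
    1 ≤ m → xs.drop m = ys → ((m : Int) + ys.length = xs.length) →
    0 ≤ start → start ≤ (m : Int) - 1 → ((m : Int) - 1 - start = l - s) →
    PySem.List.pyGetD xs start 0 = s → PySem.List.pyGetD xs ((m : Int) - 1) 0 = l →
    pvAFinish xs ((PySem.List.pyRange m xs.length 1).foldl (pvAStep xs) (acc, start)) =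
      acc ++ pvRunAux s l ys := by
  induction ys with
  | nil =>
      intro xs m acc start s l hm hdrop hlen h0 hle hrel hs hl
      have hmn : (m : Int) = (xs.length : Int) := by simpa using hlen
      rw [hmn, PySem.List.pyRange_one_eq_nil (le_refl _)]
      simp only [List.foldl_nil, pvAFinish, pvRunAux]
      have hne : xs ≠ [] := by
        intro h; subst h; simp at hmn; omega
      have hneg : PySem.List.pyGetD xs (-1) 0 = PySem.List.pyGetD xs ((m : Int) - 1) 0 := by
        rw [PySem.List.pyGetD_neg_one xs 0 hne, hmn]
        rw [PySem.List.pyGetD_eq_getElem xs 0 (by omega) (by omega)]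
        rw [List.getLast_eq_getElem]
        congr 1
        omega
      by_cases hcase : start < (xs.length : Int) - 1
      · have hsl : s < l := by rw [← hmn] at hcase; omega
        have hl' : PySem.List.pyGetD xs ((xs.length : Int) - 1) 0 = l := by
          rw [← hmn]; exact hl
        rw [hmn] at hneg
        simp [hcase, hsl, hs, hneg, hl']
      · have hsl : ¬ s < l := by rw [← hmn] at hcase; omega
        simp [hcase, hsl]
  | cons y ys ih =>
      intro xs m acc start s l hm hdrop hlen h0 hle hrel hs hl
      have hmlt : m < xs.length := by
        have h := congrArg List.length hdrop
        simp [List.length_drop] at h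
        omega
      have h1 : xs[m]? = some y := by
        have h : (List.drop m xs)[0]? = xs[m + 0]? := List.getElem?_drop
        rw [hdrop] at h
        simpa using h.symm
      have hy : PySem.List.pyGetD xs (m : Int) 0 = y := by
        rw [PySem.List.pyGetD_natCast]
        simp [List.getD_eq_getElem?_getD, h1]
      have hcons : PySem.List.pyRange (m : Int) (xs.length : Int) 1 =
          (m : Int) :: PySem.List.pyRange ((m : Int) + 1) (xs.length : Int) 1 :=
        PySem.List.pyRange_one_cons (by omega)
      rw [hcons]
      simp only [List.foldl_cons]
      have hdrop' : xs.drop (m + 1) = ys := by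
        have h : (xs.drop m).drop 1 = xs.drop (m + 1) := by
          rw [List.drop_drop]
        rw [← h, hdrop]
        simp
      have hm1 : (((m + 1 : Nat)) : Int) - 1 = (m : Int) := by push_cast; ring
      by_cases hadj : y = l + 1
      · -- adjacent: branch not taken, state unchanged
        have hstep : pvAStep xs (acc, start) (m : Int) = (acc, start) := by
          simp only [pvAStep]
          rw [if_neg]
          simp only [ne_eq, not_not]
          rw [hy, hl]
          exact hadj
        rw [hstep]
        have a1 : 1 ≤ m + 1 := by omega
        have a2 : ((m + 1 : Nat) : Int) + ((ys.length : Nat) : Int) = ((xs.length : Nat) : Int) := by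
          simp only [List.length_cons] at hlen; push_cast at hlen ⊢; omega
        have a3 : start ≤ ((m + 1 : Nat) : Int) - 1 := by push_cast; omega
        have a4 : ((m + 1 : Nat) : Int) - 1 - start = y - s := by push_cast; omega
        have hrec := ih xs (m + 1) acc start s y a1 hdrop' a2 h0 a3 a4 hs (by rw [hm1]; exact hy)
        have hcast : (((m + 1 : Nat)) : Int) = (m : Int) + 1 := by push_cast; ring
        rw [hcast] at hrec
        rw [hrec]
        simp [pvRunAux, hadj]
      · -- break: close the run if it has length ≥ 2, new start = m
        have hstep : pvAStep xs (acc, start) (m : Int) =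
            ((if start < (m : Int) - 1 then acc ++ [(s, l + 1)] else acc), (m : Int)) := by
          simp only [pvAStep]
          rw [if_pos]
          · by_cases hc : start < (m : Int) - 1
            · simp [hc, hs, hl]
            · simp [hc]
          · simp only [ne_eq]
            rw [hy, hl]
            exact hadj
        rw [hstep]
        set acc' := (if start < (m : Int) - 1 then acc ++ [(s, l + 1)] else acc) with hacc
        have b1 : 1 ≤ m + 1 := by omega
        have b2 : ((m + 1 : Nat) : Int) + ((ys.length : Nat) : Int) = ((xs.length : Nat) : Int) := by
          simp only [List.length_cons] at hlen; push_cast at hlen ⊢; omega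
        have b3 : (m : Int) ≤ ((m + 1 : Nat) : Int) - 1 := by push_cast; omega
        have b4 : ((m + 1 : Nat) : Int) - 1 - (m : Int) = y - y := by push_cast; omega
        have hrec := ih xs (m + 1) acc' (m : Int) y y b1 hdrop' b2 (by omega) b3 b4 hy
          (by rw [hm1]; exact hy)
        have hcast : (((m + 1 : Nat)) : Int) = (m : Int) + 1 := by push_cast; ring
        rw [hcast] at hrec
        rw [hrec]
        have hiff : start < (m : Int) - 1 ↔ s < l := by omega
        by_cases hc : s < l
        · rw [hacc, if_pos (hiff.mpr hc)]
          simp [pvRunAux, hadj, hc]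
        · rw [hacc, if_neg (fun h => hc (hiff.mp h))]
          simp [pvRunAux, hadj, hc]

theorem pvA_eq_spec (xs : List Int) : compute_start_and_end_indices_py xs = pvSpecTop xs := by
  cases xs with
  | nil =>
      simp [compute_start_and_end_indices_py, pvSpecTop, PySem.List.pyRange_one_eq_nil]
  | cons x t =>
      have hA : compute_start_and_end_indices_py (x :: t) =
          pvAFinish (x :: t) ((PySem.List.pyRange 1 ((x :: t).length : Int) 1).foldl
            (pvAStep (x :: t)) ([], 0)) := rfl
      rw [hA]
      have hx : PySem.List.pyGetD (x :: t) 0 0 = x := PySem.List.pyGetD_zero_cons x t 0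
      have hlen : ((1 : Nat) : Int) + ((t.length : Nat) : Int) = (((x :: t).length : Nat) : Int) := by
        simp only [List.length_cons]; push_cast; omega
      have h := pvA_loop t (x :: t) 1 [] 0 x x (le_refl 1) (by simp) hlen
        (le_refl 0) (by norm_num) (by norm_num) (by norm_num [hx])
        (by norm_num [hx])
      have h1 : ((1 : Nat) : Int) = (1 : Int) := by norm_num
      rw [h1] at h
      rw [h]
      simp [pvSpecTop]

-- ===== VERDICT (by name: the statement is the Claim_ definition above) =====
theorem compute_start_and_end_indices_py_spec : Claim_equal_compute_start_and_end_indices_py := by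
  intro indices _
  unfold Spec_compute_start_and_end_indices_py
  rw [pvA_eq_spec, pvB_eq_spec]
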